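-- pv_equiv track=rewrite | github.com/chjdev/euler | python/problem30.py | _minus_one
-- ===== SOURCE A (Python) =====
-- def _minus_one(lst, i=0):
--     if lst[i] > 0:
--         lst[i] -= 1
--         return lst
--     if lst[i] == 0:
--         if i == len(lst) - 1:
--             lst = [9] * (len(lst) - 1)
--         else:
--             orig_len = len(lst)
--             lst = _minus_one(lst, i + 1)
--             if orig_len == len(lst):
--                 lst[i] = lst[i + 1]
--     return lst
-- ===== SOURCE B (Python) =====
-- def _minus_one(lst, i=0):
--     n = len(lst)
--     j = i
--     while lst[j] == 0:
--         if j == n - 1: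
--             return [9] * (n - 1)
--         j += 1
--     v = lst[j] - 1
--     for k in range(i, j + 1):
--         lst[k] = v
--     return lst
-- ===== Notes on version B (the rewrite author's own statement) =====
-- stated objective: simpler
-- what changed: Replaces A's recursive unwind (recurse to the first non-zero digit, then copy the decremented value downwards one cell per stack frame) by a flat iterative scan for the first non-zero index followed by a single fill loop; Pre_ excludes inputs where the first non-zero entry met by that scan is negative (digits are non-negative for this borrow operation), where A keeps/copies the negative value while B decrements it.
-- outside the precondition, e.g. on _minus_one([-3], 0): A returns [-3], B returns [-4]
import Mathlib
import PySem

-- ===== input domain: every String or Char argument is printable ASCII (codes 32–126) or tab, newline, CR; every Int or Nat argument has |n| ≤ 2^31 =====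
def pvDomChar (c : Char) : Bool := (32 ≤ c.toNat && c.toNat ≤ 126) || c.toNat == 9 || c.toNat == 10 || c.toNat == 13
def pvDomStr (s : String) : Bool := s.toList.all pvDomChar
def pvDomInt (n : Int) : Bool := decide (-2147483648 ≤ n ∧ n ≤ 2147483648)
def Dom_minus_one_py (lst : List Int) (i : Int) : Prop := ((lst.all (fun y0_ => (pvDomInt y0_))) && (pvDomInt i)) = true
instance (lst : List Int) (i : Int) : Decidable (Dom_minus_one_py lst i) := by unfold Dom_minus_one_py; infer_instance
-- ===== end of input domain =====

-- B replaces A's recursive unwind-and-copy by an iterative scan plus a fill loop (objective: simpler).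
-- Both A and B mutate lst in place in the Python; the theorems here are about the return value.

-- ===== PORT A =====
-- literal port of the recursion; the dite guard only makes lst[i] total (none = IndexError, excluded by Pre_)
def minus_one_py (lst : List Int) (i : Int) : List Int :=
  if h : PySem.Raise.InRange lst.length i then
    let x := PySem.List.pyGetD lst i 0          -- lst[i], in range by h
    if 0 < x then PySem.List.pySetD lst i (x - 1)
    else if x = 0 then
      if i = (lst.length : Int) - 1 then List.replicate (lst.length - 1) 9
      else
        let r := minus_one_py lst (i + 1)
        if (lst.length : Int) = (r.length : Int) then
          PySem.List.pySetD r i (PySem.List.pyGetD r (i + 1) 0)   -- lst[i] = lst[i+1]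
        else r
    else lst
  else lst
termination_by ((lst.length : Int) - i).toNat
decreasing_by simp only [PySem.Raise.InRange] at h; omega

-- ===== PORT B =====
-- for k in range(i, j + 1): lst[k] = v
def fill_alt (lst : List Int) (i j v : Int) : List Int :=
  (PySem.List.pyRange i (j + 1) 1).foldl (fun acc k => PySem.List.pySetD acc k v) lst

-- the while loop: scan j upward while lst[j] == 0
def scan_alt (lst : List Int) (i j : Int) : List Int :=
  if h : PySem.Raise.InRange lst.length j then
    let x := PySem.List.pyGetD lst j 0          -- lst[j], in range by h
    if x = 0 then
      if j = (lst.length : Int) - 1 then List.replicate (lst.length - 1) 9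
      else scan_alt lst i (j + 1)
    else fill_alt lst i j (x - 1)
  else lst
termination_by ((lst.length : Int) - j).toNat
decreasing_by simp only [PySem.Raise.InRange] at h; omega

def minus_one_py_alt (lst : List Int) (i : Int) : List Int := scan_alt lst i i

-- ===== PRECONDITION & SPEC =====
-- normalised (Python) index: nonnegative position named by k in a list of length n
def nrm (n : Nat) (k : Int) : Nat := (if k < 0 then k + n else k).toNat

-- the first non-zero entry of a list, if any
def firstNonZero (l : List Int) : Option Int := (l.dropWhile (fun x => x = 0)).head?

-- Pre_ excludes the inputs where Python A raises IndexError (index out of range; B raises there too),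
-- and the inputs whose first non-zero entry met by the scan from index i (wrapping for negative i) is
-- negative: digits are non-negative for this borrow operation, and there A keeps/copies the negative
-- value while B decrements it.
def Pre_minus_one_py (lst : List Int) (i : Int) : Prop :=
  PySem.Raise.InRange lst.length i ∧
  ∀ x ∈ firstNonZero (lst.drop (nrm lst.length i) ++
          if i < 0 then lst.take (nrm lst.length i) else []), 0 < x
instance (lst : List Int) (i : Int) : Decidable (Pre_minus_one_py lst i) := by
  unfold Pre_minus_one_py; infer_instance
def pvWitness_minus_one_py : List Int × Int := ([1, 0, 2], 0)

def Spec_minus_one_py (lst : List Int) (i : Int) (out : List Int) : Prop := out = minus_one_py_alt lst i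
instance (lst : List Int) (i : Int) (out : List Int) : Decidable (Spec_minus_one_py lst i out) := by unfold Spec_minus_one_py; infer_instance

-- ===== CLAIM (what is proved, stated in full; the proofs are below) =====
def Claim_equal_minus_one_py : Prop := ∀ (lst : List Int) (i : Int), Dom_minus_one_py lst i → Pre_minus_one_py lst i → Spec_minus_one_py lst i (minus_one_py lst i)

-- ===== LEMMAS AND PROOFS =====

-- the positivity part of Pre_, as the loop invariant of the scan
def Good (lst : List Int) (i : Int) : Prop :=
  ∀ x ∈ firstNonZero (lst.drop (nrm lst.length i) ++
          if i < 0 then lst.take (nrm lst.length i) else []), 0 < x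

theorem pyIdx?_eq_nrm (n : Nat) (k : Int) (h : PySem.Raise.InRange n k) :
    PySem.List.pyIdx? n k = some (nrm n k) := by
  simp only [PySem.Raise.InRange] at h
  simp only [PySem.List.pyIdx?, nrm]
  split_ifs with h1 h2 h3 <;> first
  | (refine congrArg some ?_; omega)
  | omega

theorem nrm_lt (n : Nat) (k : Int) (h : PySem.Raise.InRange n k) : nrm n k < n := by
  simp only [PySem.Raise.InRange] at h; simp only [nrm]; omega

theorem pyGetD_eq_nrm (lst : List Int) (k : Int) (d : Int) (h : PySem.Raise.InRange lst.length k) :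
    PySem.List.pyGetD lst k d = (lst[nrm lst.length k]?).getD d := by
  simp only [PySem.List.pyGetD, PySem.List.pyGet?, pyIdx?_eq_nrm _ _ h, Option.bind_some]

theorem pySetD_eq_nrm (lst : List Int) (k v : Int) (h : PySem.Raise.InRange lst.length k) :
    PySem.List.pySetD lst k v = lst.set (nrm lst.length k) v := by
  simp only [PySem.List.pySetD, PySem.List.pySet?, pyIdx?_eq_nrm _ _ h, Option.map_some, Option.getD_some]

theorem firstNonZero_cons_zero (l : List Int) : firstNonZero (0 :: l) = firstNonZero l := by
  simp [firstNonZero]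

theorem firstNonZero_cons_ne (x : Int) (l : List Int) (hx : x ≠ 0) :
    firstNonZero (x :: l) = some x := by
  simp [firstNonZero, hx]

theorem firstNonZero_append_zero (l : List Int) :
    firstNonZero (l ++ [0]) = firstNonZero l := by
  induction l with
  | nil => simp [firstNonZero, List.dropWhile]
  | cons a l ih =>
    rw [List.cons_append]
    by_cases ha : a = 0
    · subst ha
      rw [firstNonZero_cons_zero, firstNonZero_cons_zero, ih]
    · rw [firstNonZero_cons_ne _ _ ha, firstNonZero_cons_ne _ _ ha]

theorem fill_length (ks : List Int) (v : Int) (lst : List Int) :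
    (ks.foldl (fun acc k => PySem.List.pySetD acc k v) lst).length = lst.length := by
  induction ks generalizing lst with
  | nil => rfl
  | cons k ks ih => simp [List.foldl_cons, ih, PySem.List.length_pySetD]

theorem fill_alt_length (lst : List Int) (i j v : Int) :
    (fill_alt lst i j v).length = lst.length := fill_length _ _ _

-- positions written by the fill: k itself for 0 ≤ k ≤ j, the alias k + n for negative k
theorem fill_alt_getElem? (lst : List Int) (a b v : Int)
    (ha : -(lst.length : Int) ≤ a) (hb : b < (lst.length : Int)) (p : Nat) :
    (fill_alt lst a b v)[p]? =
      if (a ≤ (p : Int) ∧ (p : Int) ≤ b) ∨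
         ((p : Int) < (lst.length : Int) ∧ a ≤ (p : Int) - (lst.length : Int) ∧ (p : Int) - (lst.length : Int) ≤ b)
      then some v else lst[p]? := by
  have key : ∀ (m : Nat) (b : Int), b < (lst.length : Int) → (b + 1 - a).toNat = m →
      (fill_alt lst a b v)[p]? =
        if (a ≤ (p : Int) ∧ (p : Int) ≤ b) ∨
           ((p : Int) < (lst.length : Int) ∧ a ≤ (p : Int) - (lst.length : Int) ∧ (p : Int) - (lst.length : Int) ≤ b)
        then some v else lst[p]? := by
    intro m
    induction m with
    | zero =>
      intro b hb' hm0
      rw [show (fill_alt lst a b v) = lst by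
        simp [fill_alt, PySem.List.pyRange_one_eq_nil (by omega : b + 1 ≤ a)]]
      rw [if_neg (by omega)]
    | succ m ih =>
      intro b hb' hms
      have hab' : a ≤ b := by omega
      have hrange : PySem.List.pyRange a (b + 1) 1 = PySem.List.pyRange a b 1 ++ [b] :=
        PySem.List.pyRange_one_succ_right (by omega)
      have hfold : fill_alt lst a b v =
          PySem.List.pySetD (fill_alt lst a (b - 1) v) b v := by
        simp only [fill_alt]
        rw [show b - 1 + 1 = b by omega, hrange, List.foldl_append, List.foldl_cons, List.foldl_nil]
      have hinb : PySem.Raise.InRange lst.length b := ⟨by omega, hb'⟩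
      have hlenf : (fill_alt lst a (b - 1) v).length = lst.length := fill_alt_length _ _ _ _
      have hinb' : PySem.Raise.InRange (fill_alt lst a (b - 1) v).length b := by rw [hlenf]; exact hinb
      rw [hfold, pySetD_eq_nrm _ _ _ hinb', List.getElem?_set,
          ih (b - 1) (by omega) (by omega), hlenf]
      have hnrm : ((nrm lst.length b : Nat) : Int) = if b < 0 then b + lst.length else b := by
        simp only [nrm]; split_ifs <;> omega
      by_cases hpb : nrm lst.length b = p
      · have hpc : ((p : Nat) : Int) = if b < 0 then b + lst.length else b := by rw [← hpb]; exact hnrm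
        rw [if_pos hpb, if_pos (show nrm lst.length b < lst.length from nrm_lt _ _ hinb),
            if_pos (by split_ifs at hpc <;> omega)]
      · have hpc : ((p : Nat) : Int) ≠ if b < 0 then b + lst.length else b := by
          rw [← hnrm]
          exact_mod_cast fun hc => hpb (by exact_mod_cast hc.symm)
        rw [if_neg hpb]
        congr 1
        simp only [eq_iff_iff]
        constructor <;> intro hc <;> split_ifs at hpc <;> omega
  exact key ((b + 1 - a).toNat) b hb rfl

-- the bridge: scanning with fill start i equals scanning with fill start i+1 followed by A's patch at i
theorem scan_shift (lst : List Int) (i j : Int)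
    (hi : -(lst.length : Int) ≤ i) (hij : i + 1 ≤ j) (hj : PySem.Raise.InRange lst.length j) :
    scan_alt lst i j =
      (if ((lst.length : Int)) = ((scan_alt lst (i + 1) j).length : Int) then
        PySem.List.pySetD (scan_alt lst (i + 1) j) i (PySem.List.pyGetD (scan_alt lst (i + 1) j) (i + 1) 0)
      else scan_alt lst (i + 1) j) := by
  have hn0 : 0 < (lst.length : Int) := by
    obtain ⟨h1, h2⟩ := hj; omega
  have hkey : ∀ (m : Nat) (j : Int), i + 1 ≤ j → PySem.Raise.InRange lst.length j →
      ((lst.length : Int) - j).toNat = m →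
      scan_alt lst i j =
        (if ((lst.length : Int)) = ((scan_alt lst (i + 1) j).length : Int) then
          PySem.List.pySetD (scan_alt lst (i + 1) j) i (PySem.List.pyGetD (scan_alt lst (i + 1) j) (i + 1) 0)
        else scan_alt lst (i + 1) j) := by
    intro m
    induction m with
    | zero => intro j hij' hj' hm; obtain ⟨h1, h2⟩ := hj'; omega
    | succ m ih =>
      intro j hij' hj' hm
      rw [scan_alt, dif_pos hj']
      conv_rhs => rw [scan_alt, dif_pos hj']
      by_cases hz : PySem.List.pyGetD lst j 0 = 0
      · rw [if_pos hz, if_pos hz]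
        by_cases hend : j = (lst.length : Int) - 1
        · rw [if_pos hend, if_pos hend]
          rw [if_neg (by
            simp only [List.length_replicate]
            obtain ⟨h1, h2⟩ := hj'; omega)]
        · rw [if_neg hend, if_neg hend]
          exact ih (j + 1) (by omega) (⟨by obtain ⟨h1,h2⟩ := hj'; omega, by obtain ⟨h1,h2⟩ := hj'; omega⟩) (by omega)
      · rw [if_neg hz, if_neg hz]
        set v := PySem.List.pyGetD lst j 0 - 1 with hv
        have hlen : (fill_alt lst (i + 1) j v).length = lst.length := fill_alt_length _ _ _ _
        rw [if_pos (by rw [hlen])]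
        have hi1r : PySem.Raise.InRange lst.length (i + 1) := ⟨by omega, by obtain ⟨h1,h2⟩ := hj'; omega⟩
        have hir : PySem.Raise.InRange lst.length i := ⟨hi, by obtain ⟨h1,h2⟩ := hj'; omega⟩
        have hi1r' : PySem.Raise.InRange (fill_alt lst (i + 1) j v).length (i + 1) := by rw [hlen]; exact hi1r
        have hir' : PySem.Raise.InRange (fill_alt lst (i + 1) j v).length i := by rw [hlen]; exact hir
        -- reading back lst[i+1] after the fill gives v
        have hread : PySem.List.pyGetD (fill_alt lst (i + 1) j v) (i + 1) 0 = v := by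
          rw [pyGetD_eq_nrm _ _ _ hi1r', hlen]
          rw [fill_alt_getElem? lst (i + 1) j v (by omega) (by obtain ⟨h1,h2⟩ := hj'; omega)]
          have hnrm : ((nrm lst.length (i+1) : Nat) : Int) = if i + 1 < 0 then i + 1 + lst.length else i + 1 := by
            simp only [nrm]; split_ifs <;> omega
          rw [if_pos (by split_ifs at hnrm <;> omega)]
          rfl
        rw [hread, pySetD_eq_nrm _ _ _ hir']
        -- now both sides are fills; compare positionwise
        have hjlt : j < (lst.length : Int) := hj'.2
        refine List.ext_getElem? ?_
        intro p
        rw [List.getElem?_set, hlen]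
        rw [fill_alt_getElem? lst i j v (by omega) hjlt p,
            fill_alt_getElem? lst (i + 1) j v (by omega) hjlt p]
        have hnrmi : ((nrm lst.length i : Nat) : Int) = if i < 0 then i + lst.length else i := by
          simp only [nrm]; split_ifs <;> omega
        by_cases hpi : nrm lst.length i = p
        · have hpc : ((p : Nat) : Int) = if i < 0 then i + lst.length else i := by rw [← hpi]; exact hnrmi
          rw [if_pos hpi, if_pos (show nrm lst.length i < lst.length from nrm_lt _ _ hir),
              if_pos (by split_ifs at hpc <;> omega)]
        · have hpc : ((p : Nat) : Int) ≠ if i < 0 then i + lst.length else i := by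
            rw [← hnrmi]
            exact_mod_cast fun hc => hpi (by exact_mod_cast hc.symm)
          rw [if_neg hpi]
          congr 1
          simp only [eq_iff_iff]
          constructor <;> intro hc <;> split_ifs at hpc <;> omega
  exact hkey (((lst.length : Int) - j).toNat) j hij hj rfl

-- the invariant survives one step of the scan over a zero entry
theorem good_step (lst : List Int) (i : Int) (hi : PySem.Raise.InRange lst.length i)
    (hz : lst[nrm lst.length i]? = some 0)
    (hg : Good lst i) : Good lst (i + 1) := by
  obtain ⟨h1, h2⟩ := hi
  have hk : nrm lst.length i < lst.length := nrm_lt _ _ ⟨h1, h2⟩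
  have hget : lst[nrm lst.length i] = 0 := by
    have h' := hz
    rw [List.getElem?_eq_getElem hk] at h'
    exact Option.some.inj h'
  have hdrop : lst.drop (nrm lst.length i) = 0 :: lst.drop (nrm lst.length i + 1) := by
    rw [List.drop_eq_getElem_cons hk, hget]
  by_cases hineg : i < 0
  · by_cases hi1 : i + 1 < 0
    · -- still negative: position advances by one, the zero moves from the drop side to the take side
      have hkeq : nrm lst.length (i + 1) = nrm lst.length i + 1 := by
        simp only [nrm]; split_ifs <;> omega
      have htake : lst.take (nrm lst.length i + 1) = lst.take (nrm lst.length i) ++ [0] := by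
        rw [List.take_add_one, List.getElem?_eq_getElem hk, hget]; rfl
      intro x hx
      apply hg
      rw [if_pos hineg, hdrop, List.cons_append, firstNonZero_cons_zero]
      rw [if_pos hi1, hkeq, htake] at hx
      rwa [← List.append_assoc, firstNonZero_append_zero] at hx
    · -- i = -1: wrap to position 0; the whole list is (take) ++ [0]
      have hi0 : i + 1 = 0 := by omega
      have hkeq : nrm lst.length i = lst.length - 1 := by simp only [nrm, if_pos hineg]; omega
      intro x hx
      apply hg
      rw [if_pos hineg]
      simp only [hkeq] at hdrop ⊢
      rw [hdrop, List.cons_append, firstNonZero_cons_zero,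
          List.drop_eq_nil_of_le (by omega : lst.length ≤ lst.length - 1 + 1), List.nil_append]
      rw [hi0] at hx
      rw [if_neg (lt_irrefl (0 : Int))] at hx
      have hnrm0 : nrm lst.length 0 = 0 := by simp [nrm]
      rw [hnrm0, List.drop_zero, List.append_nil] at hx
      have hsplit : lst = lst.take (lst.length - 1) ++ [0] := by
        conv_lhs => rw [← List.take_append_drop (lst.length - 1) lst]
        congr 1
        rw [hdrop, List.drop_eq_nil_of_le (by omega : lst.length ≤ lst.length - 1 + 1)]
      rw [hsplit, firstNonZero_append_zero] at hx
      exact hx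
  · -- i ≥ 0: plain advance, no take side
    have hi1 : ¬ (i + 1 < 0) := by omega
    have hkeq : nrm lst.length (i + 1) = nrm lst.length i + 1 := by
      simp only [nrm]; split_ifs <;> omega
    intro x hx
    apply hg
    rw [if_neg hineg, List.append_nil, hdrop, firstNonZero_cons_zero]
    rw [if_neg hi1, hkeq, List.append_nil] at hx
    exact hx

-- under the invariant, a non-zero entry met by the scan is positive
theorem good_pos (lst : List Int) (i : Int) (hi : PySem.Raise.InRange lst.length i)
    (hg : Good lst i) (hnz : PySem.List.pyGetD lst i 0 ≠ 0) : 0 < PySem.List.pyGetD lst i 0 := by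
  have hk : nrm lst.length i < lst.length := nrm_lt _ _ hi
  have hval : PySem.List.pyGetD lst i 0 = lst[nrm lst.length i] := by
    rw [pyGetD_eq_nrm _ _ _ hi, List.getElem?_eq_getElem hk]; rfl
  apply hg
  rw [List.drop_eq_getElem_cons hk, List.cons_append,
      firstNonZero_cons_ne _ _ (by rw [← hval]; exact hnz)]
  rw [hval]; rfl

theorem minus_one_eq_scan (lst : List Int) (i : Int) (h : PySem.Raise.InRange lst.length i)
    (hg : Good lst i) : minus_one_py lst i = scan_alt lst i i := by
  have hkey : ∀ (m : Nat) (i : Int), PySem.Raise.InRange lst.length i → Good lst i →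
      ((lst.length : Int) - i).toNat = m → minus_one_py lst i = scan_alt lst i i := by
    intro m
    induction m with
    | zero => intro i hi _ hm; obtain ⟨h1, h2⟩ := hi; omega
    | succ m ih =>
      intro i hi hgi hm
      rw [minus_one_py, dif_pos hi, scan_alt, dif_pos hi]
      by_cases hz : PySem.List.pyGetD lst i 0 = 0
      · rw [if_neg (by omega), if_pos hz, if_pos hz]
        by_cases hend : i = (lst.length : Int) - 1
        · rw [if_pos hend, if_pos hend]
        · rw [if_neg hend, if_neg hend]
          have hi1 : PySem.Raise.InRange lst.length (i + 1) :=
            ⟨by obtain ⟨h1,h2⟩ := hi; omega, by obtain ⟨h1,h2⟩ := hi; omega⟩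
          have hz' : lst[nrm lst.length i]? = some 0 := by
            have hv := pyGetD_eq_nrm lst i 0 hi
            rw [List.getElem?_eq_getElem (nrm_lt _ _ hi)] at hv ⊢
            simp only [Option.getD_some] at hv
            rw [← hv, hz]
          have hg1 : Good lst (i + 1) := good_step lst i hi hz' hgi
          rw [ih (i + 1) hi1 hg1 (by obtain ⟨h1,h2⟩ := hi; omega)]
          exact (scan_shift lst i (i + 1) hi.1 (by omega) hi1).symm
      · have hpos : 0 < PySem.List.pyGetD lst i 0 := good_pos lst i hi hgi hz
        rw [if_pos hpos, if_neg hz]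
        simp [fill_alt, PySem.List.pyRange_one_singleton]
  exact hkey (((lst.length : Int) - i).toNat) i h hg rfl

-- ===== VERDICT (by name: the statement is the Claim_ definition above) =====
theorem minus_one_py_spec : Claim_equal_minus_one_py := by
  intro lst i _ hpre
  unfold Spec_minus_one_py minus_one_py_alt
  exact minus_one_eq_scan lst i hpre.1 hpre.2
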